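-- pv_equiv track=rewrite | github.com/mhk51/doctor-backend | scheduler.py | get_media_content
-- ===== SOURCE A (Python) =====
-- def get_media_content(media_type):
--     supported_media_types = {
--         'audio': ['audio/aac', 'audio/mp4', 'audio/mpeg', 'audio/amr', 'audio/ogg', 'audio/ogg; codecs:opus'],
--         'document': [
--             'text/plain', 'application/pdf', 'application/vnd.ms-powerpoint',
--             'application/msword', 'application/vnd.ms-excel',
--             'application/vnd.openxmlformats-officedocument.wordprocessingml.document',
--             'application/vnd.openxmlformats-officedocument.presentationml.presentation',
--             'application/vnd.openxmlformats-officedocument.spreadsheetml.sheet'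
--         ],
--         'image': ['image/jpeg', 'image/png', 'image/webp'],
--         'video': ['video/mp4', 'video/3gp']
--     }
--
--     for content_type, types in supported_media_types.items():
--         if media_type in types:
--             return content_type
--
--     return None  # Unsupported media type
-- ===== SOURCE B (Python) =====
-- def get_media_content(media_type):
--     # Parse the MIME type into top-level type and subtype, then classify by the
--     # top-level type with a per-branch subtype check (document covers text+application).
--     top, sep, sub = media_type.partition('/')
--     if not sep:
--         return None
--     if top == 'audio' and sub in ('aac', 'mp4', 'mpeg', 'amr', 'ogg', 'ogg; codecs:opus'):
--         return 'audio'
--     if top == 'image' and sub in ('jpeg', 'png', 'webp'):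
--         return 'image'
--     if top == 'video' and sub in ('mp4', '3gp'):
--         return 'video'
--     if top == 'text' and sub == 'plain':
--         return 'document'
--     if top == 'application' and sub in (
--             'pdf', 'vnd.ms-powerpoint', 'msword', 'vnd.ms-excel',
--             'vnd.openxmlformats-officedocument.wordprocessingml.document',
--             'vnd.openxmlformats-officedocument.presentationml.presentation',
--             'vnd.openxmlformats-officedocument.spreadsheetml.sheet'):
--         return 'document'
--     return None
-- ===== Notes on version B (the rewrite author's own statement) =====
-- stated objective: alternative
-- what changed: B parses the MIME type (partition at the first '/') and classifies by top-level type with a per-branch subtype check, instead of A's loop over four category lists testing whole-string membership.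
import Mathlib
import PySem

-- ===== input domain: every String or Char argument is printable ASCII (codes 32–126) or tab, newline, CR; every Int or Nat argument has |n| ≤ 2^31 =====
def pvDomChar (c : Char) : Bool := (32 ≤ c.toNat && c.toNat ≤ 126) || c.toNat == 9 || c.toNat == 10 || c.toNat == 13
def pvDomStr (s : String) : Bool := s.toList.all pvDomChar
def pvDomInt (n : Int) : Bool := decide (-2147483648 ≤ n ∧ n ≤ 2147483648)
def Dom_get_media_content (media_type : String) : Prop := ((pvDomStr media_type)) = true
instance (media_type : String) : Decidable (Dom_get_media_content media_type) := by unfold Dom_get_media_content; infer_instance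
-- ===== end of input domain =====

-- B parses the MIME type at its first '/' and classifies by top-level type with a
-- per-branch subtype check, instead of A's loop over four category lists (alternative).

-- ===== PORT A =====
-- the dict literal of A, as an insertion-ordered association list of (category, list of types)
def pvSupportedMediaTypes : PySem.Dict String (List String) :=
  PySem.Dict.mk
  [("audio", ["audio/aac", "audio/mp4", "audio/mpeg", "audio/amr", "audio/ogg", "audio/ogg; codecs:opus"]),
   ("document",
    ["text/plain", "application/pdf", "application/vnd.ms-powerpoint",
     "application/msword", "application/vnd.ms-excel",
     "application/vnd.openxmlformats-officedocument.wordprocessingml.document",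
     "application/vnd.openxmlformats-officedocument.presentationml.presentation",
     "application/vnd.openxmlformats-officedocument.spreadsheetml.sheet"]),
   ("image", ["image/jpeg", "image/png", "image/webp"]),
   ("video", ["video/mp4", "video/3gp"])]

-- the for-loop with early return: fold over .items, keeping the first hit
def get_media_content (media_type : String) : Option String :=
  pvSupportedMediaTypes.items.foldl
    (fun acc p =>
      match acc with
      | some r => some r
      | none => if p.2.contains media_type then some p.1 else none)
    none

-- ===== PORT B =====
-- media_type.partition('/'): split at the FIRST '/'; none = no '/' found (Source B's `if not sep`)
def pvPartitionSlash : List Char → Option (List Char × List Char)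
  | [] => none
  | c :: cs =>
    if c = '/' then some ([], cs)
    else match pvPartitionSlash cs with
         | none => none
         | some (a, b) => some (c :: a, b)

def get_media_content_alt (media_type : String) : Option String :=
  match pvPartitionSlash media_type.toList with
  | none => none
  | some (t, s) =>
    let top := String.ofList t
    let sub := String.ofList s
    if top = "audio" ∧ sub ∈ ["aac", "mp4", "mpeg", "amr", "ogg", "ogg; codecs:opus"] then some "audio"
    else if top = "image" ∧ sub ∈ ["jpeg", "png", "webp"] then some "image"
    else if top = "video" ∧ sub ∈ ["mp4", "3gp"] then some "video"
    else if top = "text" ∧ sub = "plain" then some "document"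
    else if top = "application" ∧ sub ∈
        ["pdf", "vnd.ms-powerpoint", "msword", "vnd.ms-excel",
         "vnd.openxmlformats-officedocument.wordprocessingml.document",
         "vnd.openxmlformats-officedocument.presentationml.presentation",
         "vnd.openxmlformats-officedocument.spreadsheetml.sheet"] then some "document"
    else none

-- ===== PRECONDITION & SPEC =====
def Spec_get_media_content (media_type : String) (out : Option String) : Prop := out = get_media_content_alt media_type
instance (media_type : String) (out : Option String) : Decidable (Spec_get_media_content media_type out) := by unfold Spec_get_media_content; infer_instance

-- ===== CLAIM (what is proved, stated in full; the proofs are below) =====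
def Claim_equal_get_media_content : Prop := ∀ (media_type : String), Dom_get_media_content media_type → Spec_get_media_content media_type (get_media_content media_type)

-- ===== LEMMAS AND PROOFS =====

-- partition reconstructs its input
theorem pvPartitionSlash_recon (l a b : List Char) (h : pvPartitionSlash l = some (a, b)) :
    l = a ++ '/' :: b := by
  induction l generalizing a b with
  | nil => simp [pvPartitionSlash] at h
  | cons c cs ih =>
    by_cases hc : c = '/'
    · simp [pvPartitionSlash, hc] at h
      simp [hc, ← h.1, ← h.2]
    · simp only [pvPartitionSlash, if_neg hc] at h
      cases hp : pvPartitionSlash cs with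
      | none => rw [hp] at h; simp at h
      | some p =>
        obtain ⟨a', b'⟩ := p
        rw [hp] at h
        simp at h
        obtain ⟨h1, h2⟩ := h
        subst h1
        simp [ih a' b' hp, h2]

theorem pv_eqv (media_type : String) :
    get_media_content media_type = get_media_content_alt media_type := by
  by_cases h0 : media_type = "audio/aac"
  · subst h0; rfl
  by_cases h1 : media_type = "audio/mp4"
  · subst h1; rfl
  by_cases h2 : media_type = "audio/mpeg"
  · subst h2; rfl
  by_cases h3 : media_type = "audio/amr"
  · subst h3; rfl
  by_cases h4 : media_type = "audio/ogg"
  · subst h4; rfl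
  by_cases h5 : media_type = "audio/ogg; codecs:opus"
  · subst h5; rfl
  by_cases h6 : media_type = "text/plain"
  · subst h6; rfl
  by_cases h7 : media_type = "application/pdf"
  · subst h7; rfl
  by_cases h8 : media_type = "application/vnd.ms-powerpoint"
  · subst h8; rfl
  by_cases h9 : media_type = "application/msword"
  · subst h9; rfl
  by_cases h10 : media_type = "application/vnd.ms-excel"
  · subst h10; rfl
  by_cases h11 : media_type = "application/vnd.openxmlformats-officedocument.wordprocessingml.document"
  · subst h11; rfl
  by_cases h12 : media_type = "application/vnd.openxmlformats-officedocument.presentationml.presentation"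
  · subst h12; rfl
  by_cases h13 : media_type = "application/vnd.openxmlformats-officedocument.spreadsheetml.sheet"
  · subst h13; rfl
  by_cases h14 : media_type = "image/jpeg"
  · subst h14; rfl
  by_cases h15 : media_type = "image/png"
  · subst h15; rfl
  by_cases h16 : media_type = "image/webp"
  · subst h16; rfl
  by_cases h17 : media_type = "video/mp4"
  · subst h17; rfl
  by_cases h18 : media_type = "video/3gp"
  · subst h18; rfl
  -- neither program matches: A's fold yields none; B's branches all fail
  have hA : get_media_content media_type = none := by
    simp [get_media_content, pvSupportedMediaTypes, List.contains_eq_mem, h0, h1, h2, h3, h4, h5, h6, h7, h8, h9, h10, h11, h12, h13, h14, h15, h16, h17, h18]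
  rw [hA]
  cases hp : pvPartitionSlash media_type.toList with
  | none => simp only [get_media_content_alt, hp]
  | some p =>
    obtain ⟨t, s⟩ := p
    have hrec := pvPartitionSlash_recon _ _ _ hp
    have hm2 : media_type = String.ofList t ++ "/" ++ String.ofList s := by
      apply String.toList_inj.mp
      simp [hrec]
    simp only [get_media_content_alt, hp]
    split_ifs with c1 c2 c3 c4 c5
    · obtain ⟨ht, hs⟩ := c1
      rw [ht] at hm2
      simp only [List.mem_cons, List.not_mem_nil, or_false] at hs
      rcases hs with hs|hs|hs|hs|hs|hs
      · exact h0 (by rw [hs] at hm2; exact hm2.trans (by decide))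
      · exact h1 (by rw [hs] at hm2; exact hm2.trans (by decide))
      · exact h2 (by rw [hs] at hm2; exact hm2.trans (by decide))
      · exact h3 (by rw [hs] at hm2; exact hm2.trans (by decide))
      · exact h4 (by rw [hs] at hm2; exact hm2.trans (by decide))
      · exact h5 (by rw [hs] at hm2; exact hm2.trans (by decide))
    · obtain ⟨ht, hs⟩ := c2
      rw [ht] at hm2
      simp only [List.mem_cons, List.not_mem_nil, or_false] at hs
      rcases hs with hs|hs|hs
      · exact h14 (by rw [hs] at hm2; exact hm2.trans (by decide))
      · exact h15 (by rw [hs] at hm2; exact hm2.trans (by decide))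
      · exact h16 (by rw [hs] at hm2; exact hm2.trans (by decide))
    · obtain ⟨ht, hs⟩ := c3
      rw [ht] at hm2
      simp only [List.mem_cons, List.not_mem_nil, or_false] at hs
      rcases hs with hs|hs
      · exact h17 (by rw [hs] at hm2; exact hm2.trans (by decide))
      · exact h18 (by rw [hs] at hm2; exact hm2.trans (by decide))
    · obtain ⟨ht, hs⟩ := c4
      rw [ht] at hm2
      exact h6 (by rw [hs] at hm2; exact hm2.trans (by decide))
    · obtain ⟨ht, hs⟩ := c5
      rw [ht] at hm2
      simp only [List.mem_cons, List.not_mem_nil, or_false] at hs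
      rcases hs with hs|hs|hs|hs|hs|hs|hs
      · exact h7 (by rw [hs] at hm2; exact hm2.trans (by decide))
      · exact h8 (by rw [hs] at hm2; exact hm2.trans (by decide))
      · exact h9 (by rw [hs] at hm2; exact hm2.trans (by decide))
      · exact h10 (by rw [hs] at hm2; exact hm2.trans (by decide))
      · exact h11 (by rw [hs] at hm2; exact hm2.trans (by decide))
      · exact h12 (by rw [hs] at hm2; exact hm2.trans (by decide))
      · exact h13 (by rw [hs] at hm2; exact hm2.trans (by decide))
    · rfl

-- ===== VERDICT (by name: the statement is the Claim_ definition above) =====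
theorem get_media_content_spec : Claim_equal_get_media_content := by
  intro media_type _
  unfold Spec_get_media_content
  exact pv_eqv media_type
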